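-- pv_equiv track=rewrite | github.com/H0R4T1U/Babes-Fundamentele-Programarii | Săptămâna 3/Lab3/tema/main.py | secventa_prime
-- ===== SOURCE A (Python) =====
-- def is_prime(n):
--     # Verifica daca nr este prim
--
--     if n == 0 or n == 1:
--         return False
--     if n % 2 == 0 and n != 2:
--         return False
--     for i in range(3, n, 2):
--         if i * i > n:
--             break
--         if n % i == 0:
--             return False
--
--     return True
--
-- def secventa_prime(a):
--     # Gaseste cea mai mare secventa de nr prime
--     index_cur = -1
--     index = -1
--     longest = 0
--     longest_cur = 0
--     for i in range(len(a)):
--         if is_prime(a[i]):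
--             if longest_cur == 0:
--                 index_cur = i
--             longest_cur += 1
--
--         else:
--             if longest_cur > longest:
--                 longest = longest_cur
--                 index = index_cur
--             longest_cur = 0
--     if longest_cur > longest:
--         longest = longest_cur
--         index = index_cur
--
--     return a[index:index+longest]
-- ===== SOURCE B (Python) =====
-- def is_prime(n):
--     # Verifica daca nr este prim
--
--     if n == 0 or n == 1:
--         return False
--     if n % 2 == 0 and n != 2:
--         return False
--     for i in range(3, n, 2):
--         if i * i > n:
--             break
--         if n % i == 0:
--             return False
--
--     return True
--
-- def secventa_prime(a):
--     # Split into maximal runs of primes as (start, length), then take the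
--     # first run of maximum length (max with key keeps the earliest).
--     runs = []
--     start = None
--     for i, x in enumerate(a):
--         if is_prime(x):
--             if start is None:
--                 start = i
--         elif start is not None:
--             runs.append((start, i - start))
--             start = None
--     if start is not None:
--         runs.append((start, len(a) - start))
--     if not runs:
--         return []
--     s, l = max(runs, key=lambda r: r[1])
--     return a[s:s+l]
-- ===== Notes on version B (the rewrite author's own statement) =====
-- stated objective: alternative
-- what changed: Instead of A's single scan juggling four counters (current/best index and length) with a duplicated flush after the loop, B first partitions the list into maximal runs of primes as (start, length) pairs and then selects the first run of maximum length with max(key=len), slicing it out.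
import Mathlib
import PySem

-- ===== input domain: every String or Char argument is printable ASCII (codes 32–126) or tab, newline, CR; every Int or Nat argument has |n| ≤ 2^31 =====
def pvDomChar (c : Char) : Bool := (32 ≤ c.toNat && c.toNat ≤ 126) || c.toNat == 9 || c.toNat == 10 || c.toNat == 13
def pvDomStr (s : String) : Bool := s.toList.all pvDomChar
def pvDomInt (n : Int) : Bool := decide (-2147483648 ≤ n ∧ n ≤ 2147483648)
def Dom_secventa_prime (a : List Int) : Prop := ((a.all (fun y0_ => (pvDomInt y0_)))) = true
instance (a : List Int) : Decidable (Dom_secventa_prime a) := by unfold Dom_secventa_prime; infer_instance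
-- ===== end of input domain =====

-- B replaces A's four-counter single scan by run partitioning + max-by-length selection; same results, same cost (objective: alternative).

-- ===== PORT A =====
-- the 'for i in range(3, n, 2)' loop of is_prime, with its break/return;
-- the range is walked by stepping i by 2 while i < n instead of materializing the list
def isPrimeLoop (n i : Int) : Bool :=
  if _h : i < n then
    if i * i > n then true
    else if PySem.Int.mod n i == 0 then false
    else isPrimeLoop n (i + 2)
  else true
termination_by (n - i).toNat
decreasing_by omega

def is_prime (n : Int) : Bool :=
  if n == 0 || n == 1 then false
  else if PySem.Int.mod n 2 == 0 && n != 2 then false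
  else isPrimeLoop n 3

-- body of A's for-loop; state = (index_cur, index, longest, longest_cur)
def loopA (a : List Int) (st : Int × Int × Int × Int) (i : Int) : Int × Int × Int × Int :=
  let (index_cur, index, longest, longest_cur) := st
  if is_prime (PySem.List.pyGetD a i 0) then
    let index_cur := if longest_cur == 0 then i else index_cur
    (index_cur, index, longest, longest_cur + 1)
  else if longest_cur > longest then
    (index_cur, index_cur, longest_cur, 0)
  else
    (index_cur, index, longest, 0)

def secventa_prime (a : List Int) : List Int :=
  match (PySem.List.pyRange 0 (PySem.List.len a) 1).foldl (loopA a) (-1, -1, 0, 0) with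
  | (index_cur, index, longest, longest_cur) =>
    match (if longest_cur > longest then (index_cur, longest_cur) else (index, longest)) with
    | (index, longest) => PySem.List.slice a (some index) (some (index + longest))

-- ===== PORT B =====
-- body of B's for-loop over enumerate(a); state = (runs, start)
def loopB (st : List (Int × Int) × Option Int) (p : Int × Int) : List (Int × Int) × Option Int :=
  match st, p with
  | (runs, start), (i, x) =>
    if is_prime x then
      match start with
      | none => (runs, some i)
      | some s => (runs, some s)
    else
      match start with
      | some s => (runs ++ [(s, i - s)], none)
      | none => (runs, none)

def secventa_prime_alt (a : List Int) : List Int :=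
  match (PySem.List.enumerate a 0).foldl loopB ([], none) with
  | (runs0, start) =>
    let runs := match start with
      | some s => runs0 ++ [(s, PySem.List.len a - s)]
      | none => runs0
    match PySem.List.max? runs (fun r => r.2) with
    | none => []
    | some (s, l) => PySem.List.slice a (some s) (some (s + l))

-- ===== PRECONDITION & SPEC =====
def Spec_secventa_prime (a : List Int) (out : List Int) : Prop := out = secventa_prime_alt a
instance (a : List Int) (out : List Int) : Decidable (Spec_secventa_prime a out) := by unfold Spec_secventa_prime; infer_instance

-- ===== CLAIM (what is proved, stated in full; the proofs are below) =====
def Claim_equal_secventa_prime : Prop := ∀ (a : List Int), Dom_secventa_prime a → Spec_secventa_prime a (secventa_prime a)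

-- ===== LEMMAS AND PROOFS =====

-- A's loop body as a pure function of the (index, value) pair
def stepA (st : Int × Int × Int × Int) (p : Int × Int) : Int × Int × Int × Int :=
  let (index_cur, index, longest, longest_cur) := st
  if is_prime p.2 then
    let index_cur := if longest_cur == 0 then p.1 else index_cur
    (index_cur, index, longest, longest_cur + 1)
  else if longest_cur > longest then
    (index_cur, index_cur, longest_cur, 0)
  else
    (index_cur, index, longest, 0)

-- first run of maximum length, 'keep the earlier on ties' fold
def bestF (b : Int × Int) (runs : List (Int × Int)) : Int × Int :=
  runs.foldl (fun b r => if b.2 < r.2 then r else b) b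

theorem bestF_append (b : Int × Int) (l1 l2 : List (Int × Int)) :
    bestF b (l1 ++ l2) = bestF (bestF b l1) l2 := by
  simp [bestF, List.foldl_append]

theorem bestF_snd_nonneg (runs : List (Int × Int)) (b : Int × Int) (hb : 0 ≤ b.2) :
    0 ≤ (bestF b runs).2 := by
  induction runs generalizing b with
  | nil => exact hb
  | cons r t ih =>
    simp only [bestF, List.foldl_cons]
    exact ih _ (by split <;> omega)

-- the step of Python max(runs, key=lambda r: r[1]) as a named function
def mstep (acc : Option (Int × Int)) (x : Int × Int) : Option (Int × Int) :=
  match acc with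
  | none => some x
  | some m => if m.2 < x.2 then some x else some m

theorem max?_eq_foldl_mstep (runs : List (Int × Int)) :
    PySem.List.max? runs (fun r => r.2) = runs.foldl mstep none := by
  simp only [PySem.List.max?]
  congr 1
  funext acc x
  cases acc <;> rfl

theorem foldl_maxStep (t : List (Int × Int)) (m : Int × Int) :
    t.foldl mstep (some m) = some (bestF m t) := by
  induction t generalizing m with
  | nil => rfl
  | cons r t ih =>
    rw [List.foldl_cons]
    show List.foldl mstep (if m.2 < r.2 then some r else some m) t = some (bestF m (r :: t))
    by_cases h : m.2 < r.2
    · rw [if_pos h, ih]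
      simp only [bestF, List.foldl_cons]
      rw [if_pos h]
    · rw [if_neg h, ih]
      simp only [bestF, List.foldl_cons]
      rw [if_neg h]

theorem max?_eq_bestF (runs : List (Int × Int)) (hpos : ∀ r ∈ runs, 0 < r.2) (hne : runs ≠ []) :
    PySem.List.max? runs (fun r => r.2) = some (bestF (-1, 0) runs) := by
  match runs with
  | [] => exact absurd rfl hne
  | r :: t =>
    have hr : 0 < r.2 := hpos r (by simp)
    rw [max?_eq_foldl_mstep, List.foldl_cons]
    show List.foldl mstep (some r) t = _
    have hbf : bestF (-1, 0) (r :: t) = bestF r t := by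
      simp only [bestF, List.foldl_cons]
      have h01 : ((-1 : Int), (0 : Int)).2 < r.2 := hr
      rw [if_pos h01]
    rw [hbf]
    exact foldl_maxStep t r

-- the invariant tying A's state to B's after the indices below s were processed
def InvAB (s : Int) (t : Int × Int × Int × Int) (u : List (Int × Int) × Option Int) : Prop :=
  (t.2.1, t.2.2.1) = bestF (-1, 0) u.1 ∧
  (∀ r ∈ u.1, 0 < r.2) ∧
  (match u.2 with
   | none => t.2.2.2 = 0
   | some st => t.1 = st ∧ t.2.2.2 = s - st ∧ 0 < t.2.2.2)

theorem InvAB_step (s : Int) (x : Int) (t : Int × Int × Int × Int)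
    (u : List (Int × Int) × Option Int) (h : InvAB s t u) :
    InvAB (s + 1) (stepA t (s, x)) (loopB u (s, x)) := by
  obtain ⟨ic, idx, lg, lc⟩ := t
  obtain ⟨runs, start⟩ := u
  obtain ⟨hbest, hpos, hrun⟩ := h
  dsimp only [InvAB] at hbest hpos hrun ⊢
  have hlg : 0 ≤ lg := by
    have hnn := bestF_snd_nonneg runs (-1, 0) (by norm_num)
    have hsnd := congrArg Prod.snd hbest
    dsimp only at hsnd hnn
    omega
  by_cases hp : is_prime x = true
  · cases start with
    | none =>
      dsimp only at hrun
      subst hrun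
      simp only [stepA, loopB, hp, if_true]
      refine ⟨hbest, hpos, ?_, ?_, ?_⟩ <;> simp
    | some st =>
      obtain ⟨h1, h2, h3⟩ := hrun
      have hne : (lc == 0) = false := by simp; omega
      simp only [stepA, loopB, hp, if_true, hne]
      exact ⟨hbest, hpos, h1, by omega, by omega⟩
  · simp only [Bool.not_eq_true] at hp
    cases start with
    | none =>
      dsimp only at hrun
      subst hrun
      simp only [stepA, loopB, hp, Bool.false_eq_true, if_false, gt_iff_lt,
        if_neg (by omega : ¬ lg < (0 : Int))]
      exact ⟨hbest, hpos, by trivial⟩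
    | some st =>
      obtain ⟨h1, h2, h3⟩ := hrun
      subst h1
      simp only [stepA, loopB, hp, Bool.false_eq_true, if_false, gt_iff_lt]
      refine ⟨?_, ?_, by split <;> rfl⟩
      · rw [bestF_append, ← hbest]
        simp only [bestF, List.foldl_cons, List.foldl_nil]
        have hsic : s - ic = lc := by omega
        rw [hsic]
        by_cases hc : lg < lc
        · rw [if_pos hc, if_pos hc]
        · rw [if_neg hc, if_neg hc]
      · intro r hr
        rcases List.mem_append.mp hr with hh | hh
        · exact hpos r hh
        · simp at hh
          subst hh
          dsimp only
          omega

theorem InvAB_fold (xs : List Int) (s : Int) (t : Int × Int × Int × Int)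
    (u : List (Int × Int) × Option Int) (h : InvAB s t u) :
    InvAB (s + xs.length) ((PySem.List.enumerate xs s).foldl stepA t)
      ((PySem.List.enumerate xs s).foldl loopB u) := by
  induction xs generalizing s t u with
  | nil => simpa using h
  | cons x xs ih =>
    rw [PySem.List.enumerate_cons]
    simp only [List.foldl_cons]
    have := ih (s + 1) _ _ (InvAB_step s x t u h)
    have harith : s + 1 + (xs.length : Int) = s + ((x :: xs).length : Int) := by
      simp; omega
    rwa [harith] at this

theorem slice_empty (a : List Int) (i : Int) :
    PySem.List.slice a (some i) (some i) = [] := by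
  apply List.eq_nil_of_length_eq_zero
  rw [PySem.List.length_slice]
  omega

theorem secventa_prime_eq_alt (a : List Int) : secventa_prime a = secventa_prime_alt a := by
  have hfold : (PySem.List.pyRange 0 (PySem.List.len a) 1).foldl (loopA a) (-1, -1, 0, 0)
      = (PySem.List.enumerate a 0).foldl stepA (-1, -1, 0, 0) := by
    rw [PySem.List.enumerate_eq_map_pyRange (d := 0), List.foldl_map]
    rfl
  have hinv0 : InvAB 0 (-1, -1, 0, 0) ([], none) := ⟨rfl, by simp, rfl⟩
  have hinv := InvAB_fold a 0 (-1, -1, 0, 0) ([], none) hinv0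
  simp only [zero_add] at hinv
  unfold secventa_prime secventa_prime_alt
  rw [hfold]
  obtain ⟨⟨ic, idx, lg, lc⟩, h1, h2⟩ :
      ∃ t, (PySem.List.enumerate a 0).foldl stepA (-1, -1, 0, 0) = t ∧ InvAB (a.length : Int) t
        ((PySem.List.enumerate a 0).foldl loopB ([], none)) := ⟨_, rfl, hinv⟩
  obtain ⟨⟨runs, start⟩, h3⟩ : ∃ u, (PySem.List.enumerate a 0).foldl loopB ([], none) = u := ⟨_, rfl⟩
  rw [h3] at h2
  rw [h1, h3]
  obtain ⟨hbest, hpos, hrun⟩ := h2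
  simp only at hbest hpos hrun
  have hlg : 0 ≤ lg := by
    have hnn := bestF_snd_nonneg runs (-1, 0) (by norm_num)
    have hsnd := congrArg Prod.snd hbest
    simp only at hsnd
    omega
  simp only [PySem.List.len_eq]
  cases start with
  | none =>
    subst hrun
    rw [if_neg (by omega : ¬ ((0:Int) > lg))]
    match runs, hbest, hpos with
    | [], hbest, _ =>
      have hidx : idx = -1 := congrArg Prod.fst hbest
      have hlg0 : lg = 0 := congrArg Prod.snd hbest
      subst hidx hlg0
      simpa using slice_empty a (-1)
    | r :: t, hbest, hpos =>
      rw [max?_eq_bestF (r :: t) hpos (by simp), ← hbest]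
  | some st =>
    obtain ⟨hic, hlc, hlcpos⟩ := hrun
    subst hic
    have hpos' : ∀ r ∈ runs ++ [(ic, (a.length : Int) - ic)], 0 < r.2 := by
      intro r hr
      rcases List.mem_append.mp hr with h | h
      · exact hpos r h
      · simp at h; subst h; simp; omega
    rw [max?_eq_bestF _ hpos' (by simp), bestF_append, ← hbest]
    simp only [bestF, List.foldl_cons, List.foldl_nil]
    rw [← hlc]

-- ===== VERDICT (by name: the statement is the Claim_ definition above) =====
theorem secventa_prime_spec : Claim_equal_secventa_prime := by
  intro a _
  unfold Spec_secventa_prime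
  exact secventa_prime_eq_alt a
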